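-- pv_equiv track=rewrite | github.com/otchkalov/Decision_making | uncertanity.py | max_max_crit
-- ===== SOURCE A (Python) =====
-- def max_max_crit(dec_matrix):
--     num_of_strategies = len(dec_matrix)
--     best_payoff = [0 for col in range(num_of_strategies)]
--     # Find the best payoff for each strategy
--     for strategy in range(num_of_strategies):
--         best_payoff[strategy] = max(dec_matrix[strategy])
--     # Find maximum payoff in set of minimals
--     max_payoff = max(best_payoff)
--     best_strategy = best_payoff.index(max_payoff)
--     return best_strategy
-- ===== SOURCE B (Python) =====
-- def max_max_crit(dec_matrix):
--     # Single-pass argmax over the rows: keep the running best row-maximum and its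
--     # index; strict '>' preserves the first-maximal-index tie-break.
--     best_strategy = 0
--     best_payoff = max(dec_matrix[0])
--     for strategy, row in enumerate(dec_matrix):
--         payoff = max(row)
--         if payoff > best_payoff:
--             best_strategy = strategy
--             best_payoff = payoff
--     return best_strategy
-- ===== Notes on version B (the rewrite author's own statement) =====
-- stated objective: simpler
-- what changed: Replaced the three-stage pipeline (build a row-max table, take its max, then .index it) by a single enumerate pass keeping a running (best index, best row-max) pair updated on strict '>', with no intermediate list.
import Mathlib
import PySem

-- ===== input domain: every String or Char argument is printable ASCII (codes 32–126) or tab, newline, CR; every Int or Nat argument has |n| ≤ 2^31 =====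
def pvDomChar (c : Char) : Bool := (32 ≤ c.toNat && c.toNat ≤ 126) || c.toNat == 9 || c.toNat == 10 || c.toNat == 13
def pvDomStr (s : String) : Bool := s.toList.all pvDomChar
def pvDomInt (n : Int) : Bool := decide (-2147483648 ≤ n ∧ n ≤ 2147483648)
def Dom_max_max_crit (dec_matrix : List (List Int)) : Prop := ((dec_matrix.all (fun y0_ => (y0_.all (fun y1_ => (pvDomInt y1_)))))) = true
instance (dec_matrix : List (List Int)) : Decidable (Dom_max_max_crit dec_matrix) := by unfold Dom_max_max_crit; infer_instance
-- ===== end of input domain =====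

-- B replaces A's three-stage pipeline (row-max table, max of the table, .index) by a
-- single enumerate pass keeping a running (best index, best row-max) pair; objective: simpler.


-- Python's max(row); the .getD 0 default is unreachable under Pre_ (rows are nonempty)
def pvRowMax (row : List Int) : Int := (PySem.List.max? row (fun y => y)).getD 0

-- ===== PORT A =====
def max_max_crit (dec_matrix : List (List Int)) : Int :=
  let num_of_strategies : Int := dec_matrix.length
  -- best_payoff = [0 for col in range(num_of_strategies)]
  let best_payoff0 : List Int := (PySem.List.pyRange 0 num_of_strategies 1).map (fun _ => 0)
  -- for strategy in range(num_of_strategies): best_payoff[strategy] = max(dec_matrix[strategy])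
  let best_payoff : List Int := (PySem.List.pyRange 0 num_of_strategies 1).foldl
    (fun bp strategy =>
      PySem.List.pySetD bp strategy (pvRowMax ((PySem.List.pyGet? dec_matrix strategy).getD [])))
    best_payoff0
  let max_payoff : Int := (PySem.List.max? best_payoff (fun y => y)).getD 0
  (((PySem.List.index? best_payoff max_payoff).getD 0 : Nat) : Int)

-- ===== PORT B =====
def max_max_crit_alt (dec_matrix : List (List Int)) : Int :=
  -- best_strategy, best_payoff = 0, max(dec_matrix[0])
  let init : Int × Int := (0, pvRowMax ((PySem.List.pyGet? dec_matrix 0).getD []))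
  -- for strategy, row in enumerate(dec_matrix): …
  ((PySem.List.enumerate dec_matrix 0).foldl
    (fun acc p =>
      let payoff := pvRowMax p.2
      if payoff > acc.2 then (p.1, payoff) else acc)
    init).1

-- ===== PRECONDITION & SPEC =====
-- A raises ValueError on an empty matrix or on an empty row (max of an empty sequence);
-- exactly those inputs are excluded.
def Pre_max_max_crit (dec_matrix : List (List Int)) : Prop :=
  dec_matrix ≠ [] ∧ ∀ row ∈ dec_matrix, row ≠ []
instance (dec_matrix : List (List Int)) : Decidable (Pre_max_max_crit dec_matrix) := by
  unfold Pre_max_max_crit; infer_instance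
def pvWitness_max_max_crit : List (List Int) := [[1, 5], [7, 2], [7, 0]]
def Spec_max_max_crit (dec_matrix : List (List Int)) (out : Int) : Prop := out = max_max_crit_alt dec_matrix
instance (dec_matrix : List (List Int)) (out : Int) : Decidable (Spec_max_max_crit dec_matrix out) := by unfold Spec_max_max_crit; infer_instance

-- ===== CLAIM (what is proved, stated in full; the proofs are below) =====
def Claim_equal_max_max_crit : Prop := ∀ (dec_matrix : List (List Int)), Dom_max_max_crit dec_matrix → Pre_max_max_crit dec_matrix → Spec_max_max_crit dec_matrix (max_max_crit dec_matrix)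

-- ===== LEMMAS AND PROOFS =====

-- A's update loop fills the zero table into the row-max table, prefix by prefix.
lemma pv_table_aux (m : List (List Int)) :
    ∀ (k : Nat), k ≤ m.length → ∀ (bp : List Int), bp.length = m.length →
      (PySem.List.pyRange 0 (k : Int) 1).foldl
        (fun bp s => PySem.List.pySetD bp s (pvRowMax ((PySem.List.pyGet? m s).getD []))) bp
      = (m.take k).map pvRowMax ++ bp.drop k := by
  intro k
  induction k with
  | zero => intro _ bp _; simp [PySem.List.pyRange_one_eq_nil]
  | succ k ih =>
    intro hk bp hbp
    have hk' : k ≤ m.length := Nat.le_of_succ_le hk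
    have hklt : k < m.length := hk
    have hcast : ((k + 1 : Nat) : Int) = (k : Int) + 1 := by push_cast; ring
    rw [hcast, PySem.List.pyRange_one_succ_right (by positivity), List.foldl_append]
    rw [ih hk' bp hbp]
    have hget : PySem.List.pyGet? m (k : Int) = some m[k] := by
      rw [PySem.List.pyGet?_natCast]; simp [hklt]
    simp only [List.foldl_cons, List.foldl_nil, hget, Option.getD_some,
      PySem.List.pySetD_natCast]
    have hlen : ((m.take k).map pvRowMax).length = k := by
      simp [hklt.le]
    rw [List.set_append_right k _ hlen.le, hlen, Nat.sub_self,
      List.drop_eq_getElem_cons (by omega : k < bp.length)]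
    rw [List.set_cons_zero, List.take_add_one, List.getElem?_eq_getElem hklt]
    simp only [Option.toList_some, List.map_append, List.map_cons, List.map_nil,
      List.append_assoc, List.singleton_append]
lemma pv_table (m : List (List Int)) :
    (PySem.List.pyRange 0 (m.length : Int) 1).foldl
      (fun bp s => PySem.List.pySetD bp s (pvRowMax ((PySem.List.pyGet? m s).getD [])))
      ((PySem.List.pyRange 0 (m.length : Int) 1).map (fun _ => 0))
    = m.map pvRowMax := by
  rw [pv_table_aux m m.length le_rfl _ (by simp [PySem.List.pyRange_one])]
  simp

-- B's fold over enumerate m only looks at pvRowMax of each row.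
lemma pv_fold_map (m : List (List Int)) :
    ∀ (k : Int) (acc : Int × Int),
      (PySem.List.enumerate m k).foldl
        (fun acc p => let payoff := pvRowMax p.2; if payoff > acc.2 then (p.1, payoff) else acc) acc
      = (PySem.List.enumerate (m.map pvRowMax) k).foldl
          (fun acc p => if p.2 > acc.2 then (p.1, p.2) else acc) acc := by
  induction m with
  | nil => intro k acc; simp [PySem.List.enumerate_nil]
  | cons r t ih =>
    intro k acc
    rw [List.map_cons, PySem.List.enumerate_cons, PySem.List.enumerate_cons,
      List.foldl_cons, List.foldl_cons, ih]

-- characterisation of the single-pass argmax fold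
lemma pv_argmax_char (t : List Int) :
    ∀ (k i0 v0 : Int),
      (PySem.List.enumerate t k).foldl
        (fun acc p => if p.2 > acc.2 then (p.1, p.2) else acc) (i0, v0)
      = if t.foldl max v0 > v0
        then (k + (((PySem.List.index? t (t.foldl max v0)).getD 0 : Nat) : Int), t.foldl max v0)
        else (i0, v0) := by
  induction t with
  | nil => intro k i0 v0; simp [PySem.List.enumerate_nil]
  | cons h t ih =>
    intro k i0 v0
    rw [PySem.List.enumerate_cons, List.foldl_cons]
    simp only [List.foldl_cons]
    by_cases hv : h > v0
    · -- update: acc becomes (k, h)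
      rw [if_pos hv, ih (k + 1) k h]
      have hmax : max v0 h = h := max_eq_right hv.le
      rw [hmax]
      have hM : t.foldl max h > v0 := lt_of_lt_of_le hv (PySem.List.le_foldl_max t h).1
      rw [if_pos hM]
      by_cases hgt : t.foldl max h > h
      · -- max lies in t, head differs from it
        rw [if_pos hgt]
        have hne : h ≠ t.foldl max h := ne_of_lt hgt
        have hmem : t.foldl max h ∈ t := by
          rcases PySem.List.foldl_max_mem t h with h1 | h1
          · exact absurd h1 (ne_of_gt hgt)
          · exact h1
        obtain ⟨j, hj⟩ := Option.isSome_iff_exists.mp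
          ((PySem.List.index?_isSome_iff t _).mpr hmem)
        rw [PySem.List.index?_cons_of_ne _ hne, hj]
        simp only [Option.map_some, Option.getD_some]
        simp only [Prod.mk.injEq, and_true]
        push_cast
        ring
      · -- head is the maximum: index 0
        rw [if_neg hgt]
        have : t.foldl max h = h := le_antisymm (not_lt.mp hgt) (PySem.List.le_foldl_max t h).1
        rw [this, PySem.List.index?_cons_self]
        simp
    · -- no update
      rw [if_neg hv, ih (k + 1) i0 v0]
      have hmax : max v0 h = v0 := max_eq_left (not_lt.mp hv)
      rw [hmax]
      by_cases hM : t.foldl max v0 > v0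
      · rw [if_pos hM, if_pos hM]
        have hne : h ≠ t.foldl max v0 := ne_of_lt (lt_of_le_of_lt (not_lt.mp hv) hM)
        have hmem : t.foldl max v0 ∈ t := by
          rcases PySem.List.foldl_max_mem t v0 with h1 | h1
          · exact absurd h1 (ne_of_gt hM)
          · exact h1
        obtain ⟨j, hj⟩ := Option.isSome_iff_exists.mp
          ((PySem.List.index?_isSome_iff t _).mpr hmem)
        rw [PySem.List.index?_cons_of_ne _ hne, hj]
        simp only [Option.map_some, Option.getD_some]
        simp only [Prod.mk.injEq, and_true]
        push_cast
        ring
      · rw [if_neg hM, if_neg hM]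

-- the two ports agree on every input (the getD defaults coincide on the degenerate ones)
lemma pv_total_eq (m : List (List Int)) : max_max_crit m = max_max_crit_alt m := by
  cases m with
  | nil => simp [max_max_crit, max_max_crit_alt, PySem.List.pyRange_one_eq_nil,
      PySem.List.enumerate_nil, PySem.List.pyGet?, pvRowMax,
      PySem.List.index?]
  | cons r rest =>
    unfold max_max_crit max_max_crit_alt
    simp only []
    rw [pv_table (r :: rest)]
    rw [pv_fold_map (r :: rest) 0]
    have hget0 : PySem.List.pyGet? (r :: rest) (0 : Int) = some r := by
      simp
    rw [hget0]
    simp only [Option.getD_some, List.map_cons]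
    rw [pv_argmax_char (pvRowMax r :: rest.map pvRowMax) 0 0 (pvRowMax r)]
    set l' := rest.map pvRowMax with hl'
    have hfold : (pvRowMax r :: l').foldl max (pvRowMax r) = l'.foldl max (pvRowMax r) := by
      simp
    rw [hfold]
    rw [PySem.List.max?_id_cons]
    simp only [Option.getD_some]
    by_cases hM : l'.foldl max (pvRowMax r) > pvRowMax r
    · rw [if_pos hM]; ring
    · rw [if_neg hM]
      have : l'.foldl max (pvRowMax r) = pvRowMax r :=
        le_antisymm (not_lt.mp hM) (PySem.List.le_foldl_max l' (pvRowMax r)).1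
      rw [this, PySem.List.index?_cons_self]
      simp

-- ===== VERDICT (by name: the statement is the Claim_ definition above) =====
theorem max_max_crit_spec : Claim_equal_max_max_crit := by
  intro m _ _
  unfold Spec_max_max_crit
  exact pv_total_eq m
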